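-- pv_equiv track=rewrite | github.com/Andre-Luiz-Teixeira/IPcalc-Calcuradora_de_IP | Binarios.py | BinWild
-- ===== SOURCE A (Python) =====
-- def BinWild(CIDR):
--     # calcula a mascara para uma string binaria
--     m = 0
--     contador = 0
--     wildbin = ''  # string de wildcard  binaria
--
--     while m < 32:
--         if contador == 8:  # separa o octeto
--             wildbin = wildbin + '.'
--             contador = 0
--
--         # Verifica se o bit vai ser 0 ou 1
--         if m <= int(CIDR - 1):
--             wildbin = wildbin + '0'
--         else:
--             wildbin = wildbin + '1'
--
--         m = m + 1
--         contador = contador + 1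
--     return wildbin
-- ===== SOURCE B (Python) =====
-- def BinWild(CIDR):
--     # closed-form: number of '0' bits is CIDR clamped to [0, 32]
--     zeros = max(0, min(32, int(CIDR - 1) + 1))
--     bits = '0' * zeros + '1' * (32 - zeros)
--     return '.'.join(bits[i:i + 8] for i in range(0, 32, 8))
-- ===== Notes on version B (the rewrite author's own statement) =====
-- stated objective: simpler
-- what changed: Replaces A's per-bit while loop with separator counter by a closed-form clamp of CIDR to the valid prefix range, direct construction of the flat bit string, and slicing it into four dot-joined octets.
import Mathlib
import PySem

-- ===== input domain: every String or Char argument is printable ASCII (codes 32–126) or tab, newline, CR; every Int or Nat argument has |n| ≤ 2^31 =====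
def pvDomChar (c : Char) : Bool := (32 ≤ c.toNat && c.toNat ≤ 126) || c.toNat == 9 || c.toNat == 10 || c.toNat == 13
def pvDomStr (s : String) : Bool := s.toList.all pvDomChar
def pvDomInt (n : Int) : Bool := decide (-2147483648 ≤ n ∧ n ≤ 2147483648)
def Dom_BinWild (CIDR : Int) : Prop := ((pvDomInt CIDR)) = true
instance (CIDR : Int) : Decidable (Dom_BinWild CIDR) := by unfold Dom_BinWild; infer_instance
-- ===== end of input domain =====

-- B replaces A's per-bit loop with a closed-form clamp + flat bit string + octet slicing (objective: simpler).

-- ===== PORT A =====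
-- while-loop of A: fuel counts the remaining iterations (32 - m); state (m, contador, wildbin)
def binWildLoop (CIDR : Int) : Nat → Int → Int → List Char → List Char
  | 0, _, _, wildbin => wildbin
  | fuel + 1, m, contador, wildbin =>
    let (wildbin, contador) :=
      if contador = 8 then (wildbin ++ ['.'], (0 : Int)) else (wildbin, contador)
    let wildbin := if m ≤ CIDR - 1 then wildbin ++ ['0'] else wildbin ++ ['1']
    binWildLoop CIDR fuel (m + 1) (contador + 1) wildbin

def BinWild (CIDR : Int) : String :=
  String.ofList (binWildLoop CIDR 32 0 0 [])

-- ===== PORT B =====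
def BinWild_alt (CIDR : Int) : String :=
  let zeros : Nat := (max 0 (min 32 (CIDR - 1 + 1))).toNat
  let bits : List Char := List.replicate zeros '0' ++ List.replicate (32 - zeros) '1'
  String.ofList (PySem.Chars.join ['.']
    ((PySem.List.pyRange 0 32 8).map (fun i => PySem.List.slice bits (some i) (some (i + 8)))))

-- ===== PRECONDITION & SPEC =====
def Spec_BinWild (CIDR : Int) (out : String) : Prop := out = BinWild_alt CIDR
instance (CIDR : Int) (out : String) : Decidable (Spec_BinWild CIDR out) := by unfold Spec_BinWild; infer_instance

-- ===== CLAIM (what is proved, stated in full; the proofs are below) =====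
def Claim_equal_BinWild : Prop := ∀ (CIDR : Int), Dom_BinWild CIDR → Spec_BinWild CIDR (BinWild CIDR)

-- ===== LEMMAS AND PROOFS =====

-- A's loop only compares m against CIDR-1 for 0 ≤ m ≤ 31, so CIDR may be replaced by its clamp to [0,32].
theorem binWildLoop_clamp (C : Int) (fuel : Nat) (m contador : Int) (w : List Char)
    (hm : 0 ≤ m) (hb : m + fuel ≤ 32) :
    binWildLoop C fuel m contador w = binWildLoop (max 0 (min 32 C)) fuel m contador w := by
  induction fuel generalizing m contador w with
  | zero => rfl
  | succ n ih =>
    simp only [binWildLoop]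
    have hcond : (m ≤ C - 1) ↔ (m ≤ max 0 (min 32 C) - 1) := by
      constructor <;> intro h <;> omega
    by_cases h : m ≤ C - 1
    · rw [if_pos h, if_pos (hcond.mp h)]
      exact ih (m + 1) _ _ (by omega) (by omega)
    · rw [if_neg h, if_neg (fun hc => h (hcond.mpr hc))]
      exact ih (m + 1) _ _ (by omega) (by omega)

theorem BinWild_clamp (C : Int) : BinWild C = BinWild (max 0 (min 32 C)) := by
  unfold BinWild
  rw [binWildLoop_clamp C 32 0 0 [] (by omega) (by omega)]

theorem BinWild_alt_clamp (C : Int) : BinWild_alt C = BinWild_alt (max 0 (min 32 C)) := by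
  unfold BinWild_alt
  have : (max 0 (min 32 (C - 1 + 1))).toNat = (max 0 (min 32 (max 0 (min 32 C) - 1 + 1))).toNat := by
    omega
  rw [this]

-- ===== VERDICT (by name: the statement is the Claim_ definition above) =====
theorem BinWild_spec : Claim_equal_BinWild := by
  intro C _
  unfold Spec_BinWild
  rw [BinWild_clamp, BinWild_alt_clamp]
  have h0 : 0 ≤ max 0 (min 32 C) := by omega
  have h32 : max 0 (min 32 C) ≤ 32 := by omega
  generalize max 0 (min 32 C) = z at h0 h32
  interval_cases z <;> decide
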